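-- pv_equiv track=rewrite | github.com/Coletrane315/pgss2019-cheatgame | Cycle/sequence.py | calculateSequence
-- ===== SOURCE A (Python) =====
-- def calculateSequence(position,num_players):
--     start = True
--     sequence = [] #The person to the left of the dealer is player 1 and plays an Ace. If one is immidiately to the left of player 1, they are player 2.
--     sequence_num = position
--
--     while ((position != sequence_num) or (start == True)):
--         sequence.append(sequence_num)
--         sequence_num = (sequence_num + num_players - 1)%13 + 1
--         start = False
--
--     return sequence
-- ===== SOURCE B (Python) =====
-- def calculateSequence(position, num_players):
--     length = 1 if num_players % 13 == 0 else 13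
--     return [(position - 1 + k * num_players) % 13 + 1 for k in range(length)]
-- ===== Notes on version B (the rewrite author's own statement) =====
-- stated objective: simpler
-- what changed: Replaces the stateful cycle-detection while-loop with a direct closed-form comprehension: the cycle length is 1 when num_players % 13 == 0 and 13 otherwise (13 is prime), and element k is computed independently as (position-1+k*num_players)%13+1.
import Mathlib
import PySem

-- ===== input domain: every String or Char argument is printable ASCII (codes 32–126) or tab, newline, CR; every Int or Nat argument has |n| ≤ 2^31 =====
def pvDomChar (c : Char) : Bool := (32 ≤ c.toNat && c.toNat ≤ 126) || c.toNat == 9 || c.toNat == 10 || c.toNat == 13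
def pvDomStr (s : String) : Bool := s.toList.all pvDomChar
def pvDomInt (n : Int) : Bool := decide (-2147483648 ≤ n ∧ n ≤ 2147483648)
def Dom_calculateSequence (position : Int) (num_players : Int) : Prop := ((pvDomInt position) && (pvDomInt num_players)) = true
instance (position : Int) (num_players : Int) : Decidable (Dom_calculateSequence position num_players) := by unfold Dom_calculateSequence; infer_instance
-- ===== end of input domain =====

-- B replaces A's stateful cycle-detection while-loop with a closed-form comprehension (objective: simpler); equal on all inputs where A terminates.

-- ===== PORT A =====
-- A's while-loop: append the current number, step it by (x + num_players - 1) % 13 + 1,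
-- stop when it returns to `position`. The loop body runs at most 13 times on every input
-- in Pre_ (the step map cycles 1..13 with cycle length 1 or 13), so fuel 13 is exact there.
def pvALoop (fuel : Nat) (position num_players : Int) (seq : List Int) (x : Int) : List Int :=
  match fuel with
  | 0 => seq
  | f+1 =>
    let seq' := seq ++ [x]
    let x' := PySem.Int.mod (x + num_players - 1) 13 + 1
    if x' = position then seq' else pvALoop f position num_players seq' x'

def calculateSequence (position : Int) (num_players : Int) : List Int :=
  pvALoop 13 position num_players [] position

-- ===== PORT B =====
def calculateSequence_alt (position : Int) (num_players : Int) : List Int :=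
  let length : Int := if PySem.Int.mod num_players 13 = 0 then 1 else 13
  (PySem.List.pyRange 0 length 1).map
    (fun k => PySem.Int.mod (position - 1 + k * num_players) 13 + 1)

-- ===== PRECONDITION & SPEC =====
-- Pre_ excludes positions outside 1..13, on which A's while-loop never terminates
-- (the stepped value always lands in 1..13 and so never equals such a position).
def Pre_calculateSequence (position : Int) (num_players : Int) : Prop :=
  1 ≤ position ∧ position ≤ 13
instance (position : Int) (num_players : Int) : Decidable (Pre_calculateSequence position num_players) := by
  unfold Pre_calculateSequence; infer_instance
def pvWitness_calculateSequence : Int × Int := (3, 5)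

def Spec_calculateSequence (position : Int) (num_players : Int) (out : List Int) : Prop := out = calculateSequence_alt position num_players
instance (position : Int) (num_players : Int) (out : List Int) : Decidable (Spec_calculateSequence position num_players out) := by unfold Spec_calculateSequence; infer_instance

-- ===== CLAIM (what is proved, stated in full; the proofs are below) =====
def Claim_equal_calculateSequence : Prop := ∀ (position : Int) (num_players : Int), Dom_calculateSequence position num_players → Pre_calculateSequence position num_players → Spec_calculateSequence position num_players (calculateSequence position num_players)

-- ===== LEMMAS AND PROOFS =====

-- Both sides depend on num_players only through num_players mod 13.
theorem pvALoop_mod (fuel : Nat) (p n : Int) :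
    ∀ (seq : List Int) (x : Int),
      pvALoop fuel p n seq x = pvALoop fuel p (PySem.Int.mod n 13) seq x := by
  induction fuel with
  | zero => intro seq x; rfl
  | succ f ih =>
    intro seq x
    have hstep : PySem.Int.mod (x + n - 1) 13
        = PySem.Int.mod (x + PySem.Int.mod n 13 - 1) 13 := by
      rw [PySem.Int.mod_eq_emod_of_pos (by norm_num : (0:Int) < 13),
          PySem.Int.mod_eq_emod_of_pos (by norm_num : (0:Int) < 13),
          PySem.Int.mod_eq_emod_of_pos (by norm_num : (0:Int) < 13)]
      omega
    simp only [pvALoop, hstep, ih]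

theorem calcA_mod (p n : Int) :
    calculateSequence p n = calculateSequence p (PySem.Int.mod n 13) := by
  unfold calculateSequence
  exact pvALoop_mod 13 p n [] p

theorem calcB_mod (p n : Int) :
    calculateSequence_alt p n = calculateSequence_alt p (PySem.Int.mod n 13) := by
  unfold calculateSequence_alt
  have h13 : (0:Int) < 13 := by norm_num
  have hmm : PySem.Int.mod (PySem.Int.mod n 13) 13 = PySem.Int.mod n 13 := by
    simp only [PySem.Int.mod_eq_emod_of_pos h13]
    omega
  rw [hmm]
  refine List.map_congr_left ?_
  intro k _
  have h : (p - 1 + k * n) % 13 = (p - 1 + k * PySem.Int.mod n 13) % 13 := by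
    have hn : n % 13 = (PySem.Int.mod n 13) % 13 := by
      rw [PySem.Int.mod_eq_emod_of_pos h13]; omega
    exact (Int.ModEq.add_left (p - 1) (Int.ModEq.mul_left k hn))
  rw [PySem.Int.mod_eq_emod_of_pos h13, PySem.Int.mod_eq_emod_of_pos h13, h]

theorem pvKey (p m : Int) (hp1 : 1 ≤ p) (hp2 : p ≤ 13) (hm1 : 0 ≤ m) (hm2 : m < 13) :
    calculateSequence p m = calculateSequence_alt p m := by
  interval_cases p <;> interval_cases m <;> decide

-- ===== VERDICT (by name: the statement is the Claim_ definition above) =====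
theorem calculateSequence_spec : Claim_equal_calculateSequence := by
  intro p n _ hpre
  unfold Spec_calculateSequence
  rw [calcA_mod, calcB_mod]
  exact pvKey p _ hpre.1 hpre.2
    (PySem.Int.mod_nonneg n (by norm_num)) (PySem.Int.mod_lt n (by norm_num))
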